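-- pv_equiv track=rewrite | github.com/levinericzimmermann/pbIII | pbIII/globals/soil.py | combine_structures_to_progressing_list
-- ===== SOURCE A (Python) =====
-- def combine_structures_to_progressing_list(structures: tuple) -> tuple:
--     complete_length = len(structures[-1])
--     progressing_list = [[] for i in structures[-1]]
--     for structure in structures:
--         length = len(structure)
--         ratio = complete_length // length
--         for item, valid_range in zip(
--             structure,
--             tuple(
--                 zip(
--                     range(0, complete_length, ratio),
--                     range(ratio, complete_length + ratio, ratio),
--                 )
--             ),
--         ):
--             for n in range(*valid_range):
--                 progressing_list[n].append(item)
--     return tuple(tuple(bar) for bar in progressing_list)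
-- ===== SOURCE B (Python) =====
-- def combine_structures_to_progressing_list(structures: tuple) -> tuple:
--     complete_length = len(structures[-1])
--     ratios = tuple(complete_length // len(structure) for structure in structures)
--     bars = []
--     for n in range(complete_length):
--         bar = []
--         for structure, ratio in zip(structures, ratios):
--             i = n // ratio
--             if i < len(structure):
--                 bar.append(structure[i])
--         bars.append(tuple(bar))
--     return tuple(bars)
-- ===== Notes on version B (the rewrite author's own statement) =====
-- stated objective: alternative
-- what changed: Rewrote output-major: B first computes each structure's ratio in one pass, then builds each output bar position by position, computing each item's index by division (n // ratio) and a bounds check, instead of A's structure-major triple loop that spreads each item across a range of positions by in-place appends.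
import Mathlib
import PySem

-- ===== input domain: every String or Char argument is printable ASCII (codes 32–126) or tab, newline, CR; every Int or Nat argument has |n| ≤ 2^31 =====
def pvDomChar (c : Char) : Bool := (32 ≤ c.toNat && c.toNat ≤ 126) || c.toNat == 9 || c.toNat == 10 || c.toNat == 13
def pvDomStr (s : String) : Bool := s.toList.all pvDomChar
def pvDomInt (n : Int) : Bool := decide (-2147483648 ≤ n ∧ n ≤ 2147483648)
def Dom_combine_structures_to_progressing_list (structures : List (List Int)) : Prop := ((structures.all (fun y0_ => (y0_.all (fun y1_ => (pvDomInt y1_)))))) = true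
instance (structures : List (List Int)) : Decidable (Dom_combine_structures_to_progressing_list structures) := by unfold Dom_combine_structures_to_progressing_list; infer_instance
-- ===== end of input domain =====

-- B rebuilds the output position-major (each bar by index division) instead of A's
-- structure-major in-place appends; equal return value on Pre_ (objective: alternative).

-- ===== PORT A =====
def combine_structures_to_progressing_list (structures : List (List Int)) : List (List Int) :=
  let complete_length : Int := ((PySem.List.pyGet? structures (-1)).getD []).length
  let progressing_list : List (List Int) :=
    ((PySem.List.pyGet? structures (-1)).getD []).map (fun _ => ([] : List Int))
  structures.foldl (fun pl structure_ =>
    let length : Int := structure_.length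
    let ratio : Int := PySem.Int.floordiv complete_length length
    (structure_.zip ((PySem.List.pyRange 0 complete_length ratio).zip
        (PySem.List.pyRange ratio (complete_length + ratio) ratio))).foldl
      (fun pl iv =>
        (PySem.List.pyRange iv.2.1 iv.2.2 1).foldl
          (fun pl n => pl.modify n.toNat (fun bar => bar ++ [iv.1])) pl)
      pl) progressing_list

-- ===== PORT B =====
def combine_structures_to_progressing_list_alt (structures : List (List Int)) : List (List Int) :=
  let complete_length : Int := ((PySem.List.pyGet? structures (-1)).getD []).length
  let ratios : List Int := structures.map (fun s => PySem.Int.floordiv complete_length (s.length : Int))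
  (PySem.List.pyRange 0 complete_length 1).map (fun n =>
    (structures.zip ratios).flatMap (fun sr =>
      let i : Int := PySem.Int.floordiv n sr.2
      if i < (sr.1.length : Int) then [(PySem.List.pyGet? sr.1 i).getD 0] else []))

-- ===== PRECONDITION & SPEC =====
-- Pre_ excludes exactly the inputs where A raises: empty `structures` (IndexError),
-- an empty structure (ZeroDivisionError), and a structure longer than the last one
-- (ratio 0, so range(..., 0) raises ValueError; this also covers len(last) == 0).
-- B raises on all of those inputs too.
def Pre_combine_structures_to_progressing_list (structures : List (List Int)) : Prop :=
  structures ≠ [] ∧ ∀ s ∈ structures, s ≠ [] ∧ s.length ≤ (structures.getLastD []).length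
instance (structures : List (List Int)) : Decidable (Pre_combine_structures_to_progressing_list structures) := by unfold Pre_combine_structures_to_progressing_list; infer_instance

def pvWitness_combine_structures_to_progressing_list : List (List Int) := [[1], [1, 2]]

def Spec_combine_structures_to_progressing_list (structures : List (List Int)) (out : List (List Int)) : Prop := out = combine_structures_to_progressing_list_alt structures
instance (structures : List (List Int)) (out : List (List Int)) : Decidable (Spec_combine_structures_to_progressing_list structures out) := by unfold Spec_combine_structures_to_progressing_list; infer_instance

-- ===== CLAIM (what is proved, stated in full; the proofs are below) =====
def Claim_equal_combine_structures_to_progressing_list : Prop := ∀ (structures : List (List Int)), Dom_combine_structures_to_progressing_list structures → Pre_combine_structures_to_progressing_list structures → Spec_combine_structures_to_progressing_list structures (combine_structures_to_progressing_list structures)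

-- ===== LEMMAS AND PROOFS =====

def pvContrib (cl j : Nat) (s : List Int) : List Int :=
  if j < s.length * (cl / s.length) then [s.getD (j / (cl / s.length)) 0] else []

theorem pv_pyGet_neg_one (xs : List (List Int)) (h : xs ≠ []) :
    (PySem.List.pyGet? xs (-1)).getD [] = xs.getLastD [] := by
  have hl : 0 < xs.length := List.length_pos_iff.mpr h
  unfold PySem.List.pyGet? PySem.List.pyIdx?
  rw [if_neg (by omega), if_pos (by omega)]
  simp [List.getLastD_eq_getLast?, List.getLast?_eq_getElem?,
    List.getElem?_eq_getElem (by omega : xs.length - 1 < xs.length)]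

theorem pv_appendRange (x : Int) : ∀ (n : Nat) (a b : Int), 0 ≤ a → (b - a).toNat = n →
    ∀ (pl : List (List Int)),
    (((PySem.List.pyRange a b 1).foldl
        (fun pl m => pl.modify m.toNat (fun bar => bar ++ [x])) pl).length = pl.length ∧
      ∀ j : Nat,
        ((PySem.List.pyRange a b 1).foldl
          (fun pl m => pl.modify m.toNat (fun bar => bar ++ [x])) pl).getD j [] =
        if a ≤ (j : Int) ∧ (j : Int) < b ∧ j < pl.length then pl.getD j [] ++ [x]
        else pl.getD j []) := by
  intro n
  induction n with
  | zero =>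
    intro a b ha hn pl
    rw [PySem.List.pyRange_one_eq_nil (by omega)]
    simp only [List.foldl_nil]
    constructor
    · trivial
    · intro j; rw [if_neg (by omega)]
  | succ n ih =>
    intro a b ha hn pl
    rw [PySem.List.pyRange_one_cons (by omega)]
    simp only [List.foldl_cons]
    obtain ⟨ihlen, ihget⟩ := ih (a + 1) b (by omega) (by omega)
      (pl.modify a.toNat (fun bar => bar ++ [x]))
    refine ⟨by rw [ihlen]; simp, fun j => ?_⟩
    rw [ihget j]
    have hmod : ∀ j : Nat, (pl.modify a.toNat (fun bar => bar ++ [x])).getD j [] =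
        if a.toNat = j ∧ j < pl.length then pl.getD j [] ++ [x] else pl.getD j [] := by
      intro j
      by_cases hj : j < pl.length
      · rw [List.getD_eq_getElem _ _ (by simpa using hj), List.getD_eq_getElem _ _ hj,
          List.getElem_modify]
        split_ifs with h1 h2 h3 <;> simp_all
      · rw [if_neg (by omega)]
        rw [List.getD_eq_default _ _ (by simpa using hj), List.getD_eq_default _ _ (by omega)]
    rw [hmod j]
    simp only [List.length_modify]
    have hat : a.toNat = j ↔ (j : Int) = a := by omega
    split_ifs with h1 h2 h3 h4 h5 h6 <;> simp_all <;> omega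

theorem pv_rangeStepCons (a b r : Int) (hr : 0 < r) (hab : a < b) :
    PySem.List.pyRange a b r = a :: PySem.List.pyRange (a + r) b r := by
  rw [PySem.List.pyRange_of_pos _ _ hr, PySem.List.pyRange_of_pos _ _ hr]
  rw [if_pos hab]
  have key : ((b - a + r - 1) / r).toNat = (if a + r < b then ((b - (a + r) + r - 1) / r).toNat else 0) + 1 := by
    split_ifs with h
    · have h1 : b - (a + r) + r - 1 = b - a - 1 := by ring
      have h2 : b - a + r - 1 = (b - a - 1) + 1 * r := by ring
      rw [h1, h2, Int.add_mul_ediv_right _ _ (by omega)]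
      have : 0 ≤ (b - a - 1) / r := Int.ediv_nonneg (by omega) (by omega)
      omega
    · have h1 : 1 ≤ (b - a + r - 1) / r := by
        rw [Int.le_ediv_iff_mul_le hr]; omega
      have h2 : (b - a + r - 1) / r < 2 := by
        rw [Int.ediv_lt_iff_lt_mul hr]; omega
      omega
  rw [key, List.range_succ_eq_map]
  simp only [List.map_cons, List.map_map]
  congr 1
  · simp
  · apply List.map_congr_left
    intro k _
    simp only [Function.comp_apply]
    push_cast
    ring

theorem pv_oneStructure (cl r : Nat) (hr : 0 < r) :
    ∀ (s : List Int) (k : Nat) (pl : List (List Int)),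
    (k + s.length) * r ≤ cl → pl.length = cl →
    (((s.zip ((PySem.List.pyRange ((k * r : Nat) : Int) (cl : Int) (r : Int)).zip
          (PySem.List.pyRange (((k * r : Nat) : Int) + (r : Int)) ((cl : Int) + (r : Int)) (r : Int)))).foldl
        (fun pl iv =>
          (PySem.List.pyRange iv.2.1 iv.2.2 1).foldl
            (fun pl n => pl.modify n.toNat (fun bar => bar ++ [iv.1])) pl) pl).length = cl ∧
      ∀ j : Nat,
        ((s.zip ((PySem.List.pyRange ((k * r : Nat) : Int) (cl : Int) (r : Int)).zip
          (PySem.List.pyRange (((k * r : Nat) : Int) + (r : Int)) ((cl : Int) + (r : Int)) (r : Int)))).foldl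
        (fun pl iv =>
          (PySem.List.pyRange iv.2.1 iv.2.2 1).foldl
            (fun pl n => pl.modify n.toNat (fun bar => bar ++ [iv.1])) pl) pl).getD j [] =
        if k * r ≤ j ∧ j < (k + s.length) * r then pl.getD j [] ++ [s.getD (j / r - k) 0]
        else pl.getD j []) := by
  intro s
  induction s with
  | nil =>
    intro k pl hk hpl
    simp only [List.zip_nil_left, List.foldl_nil, List.length_nil, Nat.add_zero] at *
    exact ⟨hpl, fun j => by rw [if_neg (by omega)]⟩
  | cons x t ih =>
    intro k pl hk hpl
    have m1 : k * r + r = (k + 1) * r := by ring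
    have m2 : (k + 1) * r + t.length * r = (k + 1 + t.length) * r := by ring
    have m3 : (k + (x :: t).length) * r = (k + 1 + t.length) * r := by
      simp only [List.length_cons]; ring
    rw [m3] at hk
    have hlt1 : ((k * r : Nat) : Int) < (cl : Int) := by omega
    have hlt2 : ((k * r : Nat) : Int) + (r : Int) < (cl : Int) + (r : Int) := by omega
    rw [pv_rangeStepCons _ _ _ (by exact_mod_cast hr) hlt1,
        pv_rangeStepCons _ _ _ (by exact_mod_cast hr) hlt2]
    simp only [List.zip_cons_cons, List.foldl_cons]
    set pl1 := (PySem.List.pyRange ((k * r : Nat) : Int) (((k * r : Nat) : Int) + (r : Int)) 1).foldl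
        (fun pl n => pl.modify n.toNat (fun bar => bar ++ [x])) pl with hpl1
    obtain ⟨len1, get1⟩ := pv_appendRange x ((((k * r : Nat) : Int) + (r : Int)) - ((k * r : Nat) : Int)).toNat
      ((k * r : Nat) : Int) (((k * r : Nat) : Int) + (r : Int)) (by positivity) rfl pl
    have hcast1 : (((k * r : Nat) : Int) + (r : Int)) = (((k + 1) * r : Nat) : Int) := by omega
    rw [hcast1]
    obtain ⟨lenI, getI⟩ := ih (k + 1) pl1 (by omega) (by rw [hpl1, len1, hpl])
    refine ⟨lenI, fun j => ?_⟩
    rw [getI j]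
    have g1 := get1 j
    rw [← hpl1] at g1
    by_cases c1 : k * r ≤ j ∧ j < (k + 1) * r
    · have hdiv : j / r = k := Nat.div_eq_of_lt_le c1.1 c1.2
      rw [if_neg (by omega), g1, if_pos (by refine ⟨by omega, by omega, by omega⟩), if_pos (by omega)]
      simp [hdiv]
    · by_cases c2 : (k + 1) * r ≤ j ∧ j < (k + 1 + t.length) * r
      · have hge : k + 1 ≤ j / r := (Nat.le_div_iff_mul_le hr).mpr c2.1
        rw [if_pos (by omega), g1, if_neg (by omega), if_pos (by omega)]
        have hs : j / r - k = (j / r - (k + 1)) + 1 := by omega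
        rw [hs]
        simp
      · rw [if_neg (by omega), g1, if_neg (by omega), if_neg (by omega)]

theorem pv_outer (cl : Nat) : ∀ (ss : List (List Int)) (pl : List (List Int)),
    pl.length = cl → (∀ s ∈ ss, s ≠ [] ∧ s.length ≤ cl) →
    ((ss.foldl (fun pl structure_ =>
        (structure_.zip ((PySem.List.pyRange 0 (cl : Int) (PySem.Int.floordiv (cl : Int) (structure_.length : Int))).zip
            (PySem.List.pyRange (PySem.Int.floordiv (cl : Int) (structure_.length : Int))
              ((cl : Int) + PySem.Int.floordiv (cl : Int) (structure_.length : Int))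
              (PySem.Int.floordiv (cl : Int) (structure_.length : Int))))).foldl
          (fun pl iv =>
            (PySem.List.pyRange iv.2.1 iv.2.2 1).foldl
              (fun pl n => pl.modify n.toNat (fun bar => bar ++ [iv.1])) pl) pl) pl).length = cl ∧
      ∀ j : Nat,
        (ss.foldl (fun pl structure_ =>
        (structure_.zip ((PySem.List.pyRange 0 (cl : Int) (PySem.Int.floordiv (cl : Int) (structure_.length : Int))).zip
            (PySem.List.pyRange (PySem.Int.floordiv (cl : Int) (structure_.length : Int))
              ((cl : Int) + PySem.Int.floordiv (cl : Int) (structure_.length : Int))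
              (PySem.Int.floordiv (cl : Int) (structure_.length : Int))))).foldl
          (fun pl iv =>
            (PySem.List.pyRange iv.2.1 iv.2.2 1).foldl
              (fun pl n => pl.modify n.toNat (fun bar => bar ++ [iv.1])) pl) pl) pl).getD j [] =
        pl.getD j [] ++ ss.flatMap (pvContrib cl j)) := by
  intro ss
  induction ss with
  | nil =>
    intro pl hpl _
    simp only [List.foldl_nil, List.flatMap_nil, List.append_nil]
    exact ⟨hpl, fun _ => trivial⟩
  | cons s ss ih =>
    intro pl hpl hcond
    obtain ⟨hne, hle⟩ := hcond s (by simp)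
    have hlen0 : 0 < s.length := List.length_pos_iff.mpr hne
    have hr : 0 < cl / s.length := Nat.one_le_div_iff hlen0 |>.mpr hle
    have hfd : PySem.Int.floordiv (cl : Int) (s.length : Int) = ((cl / s.length : Nat) : Int) :=
      PySem.Int.floordiv_natCast cl s.length
    simp only [List.foldl_cons]
    rw [hfd]
    obtain ⟨len1, get1⟩ := pv_oneStructure cl (cl / s.length) hr s 0 pl
      (by rw [Nat.zero_add, Nat.mul_comm]; exact Nat.div_mul_le_self cl s.length) hpl
    simp only [Nat.zero_mul, Nat.cast_zero, Nat.zero_le, true_and, Nat.sub_zero,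
      zero_add] at len1 get1
    obtain ⟨lenI, getI⟩ := ih _ len1 (fun s hs => hcond s (by simp [hs]))
    refine ⟨lenI, fun j => ?_⟩
    rw [getI j, List.flatMap_cons, ← List.append_assoc]
    congr 1
    rw [get1 j]
    unfold pvContrib
    split_ifs <;> simp

theorem pv_A_eq (structures : List (List Int))
    (hpre : Pre_combine_structures_to_progressing_list structures) :
    combine_structures_to_progressing_list structures =
      (List.range (structures.getLastD []).length).map
        (fun j => structures.flatMap (pvContrib (structures.getLastD []).length j)) := by
  obtain ⟨hne, hall⟩ := hpre
  unfold combine_structures_to_progressing_list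
  simp only [pv_pyGet_neg_one structures hne]
  set cl := (structures.getLastD []).length with hcl
  set init := (structures.getLastD []).map (fun _ => ([] : List Int)) with hinit
  have hinitlen : init.length = cl := by simp [hinit, hcl]
  have hinitget : ∀ j : Nat, init.getD j [] = [] := by
    intro j
    by_cases hj : j < init.length
    · rw [List.getD_eq_getElem _ _ hj]; simp [hinit]
    · rw [List.getD_eq_default _ _ (by omega)]
  obtain ⟨hlen, hget⟩ := pv_outer cl structures init hinitlen hall
  apply List.ext_getElem
  · simpa using hlen
  · intro j h1 h2
    have := hget j
    rw [List.getD_eq_getElem _ _ (by omega)] at this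
    rw [this, hinitget j]
    simp

theorem pv_B_eq (structures : List (List Int))
    (hpre : Pre_combine_structures_to_progressing_list structures) :
    combine_structures_to_progressing_list_alt structures =
      (List.range (structures.getLastD []).length).map
        (fun j => structures.flatMap (pvContrib (structures.getLastD []).length j)) := by
  obtain ⟨hne, hall⟩ := hpre
  unfold combine_structures_to_progressing_list_alt
  simp only [pv_pyGet_neg_one structures hne]
  set cl := (structures.getLastD []).length with hcl
  rw [PySem.List.pyRange_zero_nat cl, List.map_map]
  apply List.map_congr_left
  intro k hk
  simp only [Function.comp_apply]
  rw [← List.map_prod_left_eq_zip, List.flatMap_map]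
  apply List.flatMap_congr
  intro s hs
  dsimp only
  obtain ⟨hne', hle⟩ := hall s hs
  have hlen0 : 0 < s.length := List.length_pos_iff.mpr hne'
  have hr : 0 < cl / s.length := (Nat.one_le_div_iff hlen0).mpr hle
  rw [PySem.Int.floordiv_natCast cl s.length]
  set r := cl / s.length with hrdef
  unfold pvContrib
  rw [← hrdef, PySem.Int.floordiv_natCast k r]
  by_cases hc : k / r < s.length
  · rw [if_pos (by exact_mod_cast hc), if_pos (Nat.div_lt_iff_lt_mul hr |>.mp hc |>.trans_le (by rw [Nat.mul_comm]))]
    unfold PySem.List.pyGet? PySem.List.pyIdx?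
    rw [if_pos (by positivity), if_pos (by exact_mod_cast hc)]
    rw [Int.toNat_natCast]
    simp [List.getElem?_eq_getElem (by simpa using hc)]
  · rw [if_neg (by exact_mod_cast hc), if_neg (fun h => hc ((Nat.div_lt_iff_lt_mul hr).mpr (by omega)))]

-- ===== VERDICT (by name: the statement is the Claim_ definition above) =====
theorem combine_structures_to_progressing_list_spec : Claim_equal_combine_structures_to_progressing_list := by
  intro structures _ hpre
  unfold Spec_combine_structures_to_progressing_list
  rw [pv_A_eq structures hpre, pv_B_eq structures hpre]
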